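-- pv_equiv track=rewrite | github.com/robertmuth/PyZwaver | pyzwaver/command.py | _ExtractBitVector
-- ===== SOURCE A (Python) =====
-- def _ExtractBitVector(data, offset):
--     bits = set()
--     for i in range(len(data)):
--         b = data[i]
--         for j in range(8):
--             if b & (1 << j) != 0:
--                 bits.add(j + i * 8 + offset)
--     return bits
-- ===== SOURCE B (Python) =====
-- def _ExtractBitVector(data, offset):
--     # Per byte, walk only the set bits of b & 0xFF by stripping the lowest
--     # set bit (m &= m - 1); its position comes from bit_length().
--     bits = set()
--     for i, b in enumerate(data):
--         m = b & 0xFF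
--         base = i * 8 + offset
--         while m:
--             nxt = m & (m - 1)
--             low = m - nxt
--             bits.add(low.bit_length() - 1 + base)
--             m = nxt
--     return bits
-- ===== Notes on version B (the rewrite author's own statement) =====
-- stated objective: alternative
-- what changed: The inner loop testing all 8 fixed bit positions per byte is replaced by a lowest-set-bit stripping loop (m &= m-1) over b & 0xFF that visits only the set bits and derives each position from bit_length().
import Mathlib
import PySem

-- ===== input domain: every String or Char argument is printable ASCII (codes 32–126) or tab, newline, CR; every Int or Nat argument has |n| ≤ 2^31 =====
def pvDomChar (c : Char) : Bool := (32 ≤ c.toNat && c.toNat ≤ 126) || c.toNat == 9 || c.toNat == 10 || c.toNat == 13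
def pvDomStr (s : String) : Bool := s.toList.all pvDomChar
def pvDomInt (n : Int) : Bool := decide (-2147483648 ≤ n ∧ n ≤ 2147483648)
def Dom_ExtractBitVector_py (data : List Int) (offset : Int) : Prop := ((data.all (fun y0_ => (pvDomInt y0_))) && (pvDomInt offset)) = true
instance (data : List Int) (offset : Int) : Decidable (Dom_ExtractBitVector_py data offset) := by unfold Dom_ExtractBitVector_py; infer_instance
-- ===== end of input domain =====

-- B replaces the per-byte loop over all 8 bit positions by a lowest-set-bit
-- stripping loop over b & 0xFF (alternative traversal; same result).


-- ===== PORT A =====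
-- 'for i in range(len(data)): b = data[i]' is iterated as enumerate(data):
-- exact, since i runs over 0..len-1 in order and data[i] is the paired element.
-- 'b & (1 << j)' is PySem.Int.band (Python-exact on negatives); j ≥ 0 so the
-- shift amount is the Nat j from range(8).
def ExtractBitVector_py (data : List Int) (offset : Int) : List Int :=
  (PySem.List.enumerate data 0).foldl (fun bits p =>
    (List.range 8).foldl (fun s (j : Nat) =>
      if PySem.Int.band p.2 ((1:Int) <<< j) ≠ 0 then PySem.Set.add s ((j:Int) + p.1 * 8 + offset)
      else s) bits)
    PySem.Set.empty

-- ===== PORT B =====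
-- the 'while m:' loop of Source B; m = b & 0xFF is a Nat (0 ≤ b & 0xFF ≤ 255, so
-- .toNat is exact); low.bit_length() - 1 is PySem.Int.bitLength low - 1.
def pvStrip (bits : PySem.Set Int) (base : Int) (m : Nat) : PySem.Set Int :=
  if h : m = 0 then bits
  else
    let nxt := m &&& (m - 1)
    let low := m - nxt
    pvStrip (PySem.Set.add bits ((PySem.Int.bitLength (low : Int) : Int) - 1 + base)) base nxt
  termination_by m
  decreasing_by
    have : m &&& (m - 1) ≤ m - 1 := Nat.and_le_right
    omega

def ExtractBitVector_py_alt (data : List Int) (offset : Int) : List Int :=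
  (PySem.List.enumerate data 0).foldl (fun bits p =>
    pvStrip bits (p.1 * 8 + offset) ((PySem.Int.band p.2 255).toNat))
    PySem.Set.empty

-- ===== PRECONDITION & SPEC =====
def Spec_ExtractBitVector_py (data : List Int) (offset : Int) (out : List Int) : Prop := out = ExtractBitVector_py_alt data offset
instance (data : List Int) (offset : Int) (out : List Int) : Decidable (Spec_ExtractBitVector_py data offset out) := by unfold Spec_ExtractBitVector_py; infer_instance

-- ===== CLAIM (what is proved, stated in full; the proofs are below) =====
def Claim_equal_ExtractBitVector_py : Prop := ∀ (data : List Int) (offset : Int), Dom_ExtractBitVector_py data offset → Spec_ExtractBitVector_py data offset (ExtractBitVector_py data offset)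

-- ===== LEMMAS AND PROOFS =====

-- the list of positions (as Ints, already 'bit_length - 1') that pvStrip adds,
-- computed with structural fuel so that `decide` can evaluate it
def pvIdxF : Nat → Nat → List Int
  | 0, _ => []
  | fuel+1, m =>
    if m = 0 then [] else
      ((PySem.Int.bitLength ((m - (m &&& (m - 1)) : Nat) : Int) : Int) - 1) :: pvIdxF fuel (m &&& (m - 1))

theorem pvIdxF_congr : ∀ (f1 f2 m : Nat), m ≤ f1 → m ≤ f2 → pvIdxF f1 m = pvIdxF f2 m := by
  intro f1
  induction f1 with
  | zero =>
    intro f2 m h1 _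
    interval_cases m
    cases f2 <;> simp [pvIdxF]
  | succ k ih =>
    intro f2 m h1 h2
    by_cases hm : m = 0
    · subst hm; cases f2 <;> simp [pvIdxF]
    · obtain ⟨k2, rfl⟩ : ∃ k2, f2 = k2 + 1 := ⟨f2 - 1, by omega⟩
      have hle : m &&& (m - 1) ≤ m - 1 := Nat.and_le_right
      simp only [pvIdxF, if_neg hm]
      rw [ih k2 (m &&& (m - 1)) (by omega) (by omega)]

theorem pvStrip_eq (m : Nat) : ∀ (bits : PySem.Set Int) (base : Int),
    pvStrip bits base m = (pvIdxF m m).foldl (fun s j => PySem.Set.add s (j + base)) bits := by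
  induction m using Nat.strong_induction_on with
  | _ m ih =>
    intro bits base
    by_cases hm : m = 0
    · subst hm; simp [pvStrip, pvIdxF]
    · obtain ⟨k, rfl⟩ : ∃ k, m = k + 1 := ⟨m - 1, by omega⟩
      have hle : (k+1) &&& k ≤ k := Nat.and_le_right
      rw [pvStrip, dif_neg hm]
      simp only [Nat.add_sub_cancel]
      rw [ih ((k+1) &&& k) (by omega)]
      conv_rhs => rw [show pvIdxF (k+1) (k+1) = ((PySem.Int.bitLength (((k+1) - ((k+1) &&& k) : Nat) : Int) : Int) - 1) :: pvIdxF k ((k+1) &&& k) from by simp [pvIdxF]]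
      rw [List.foldl_cons]
      congr 1
      exact pvIdxF_congr ((k+1) &&& k) k ((k+1) &&& k) le_rfl hle

set_option maxRecDepth 8192 in
theorem pvFin : ∀ r ∈ List.range 256, ∀ j ∈ List.range 8,
    2^j - (r.testBit j).toNat * 2^j = ((255 - r).testBit j).toNat * 2^j := by decide

theorem pvBandPow (b : Int) (j : Nat) (hj : j < 8) :
    PySem.Int.band b ((1:Int) <<< j) = ↑(((PySem.Int.band b 255).toNat) &&& (1 <<< j)) := by
  have h1 : ((1:Int) <<< j) = ((1 <<< j : Nat) : Int) := Int.mem_toNat?.mp rfl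
  have h255 : (255 : Nat) = 2^8 - 1 := by norm_num
  by_cases hb : 0 ≤ b
  · have hA : PySem.Int.band b ((1:Int) <<< j) = ↑(b.toNat &&& (1 <<< j)) := by
      unfold PySem.Int.band
      rw [h1, if_pos hb, if_pos (Int.natCast_nonneg _), Int.toNat_natCast]
    have hM : PySem.Int.band b 255 = ↑(b.toNat &&& 255) := by
      unfold PySem.Int.band; simp [hb]
    rw [hA, hM, Int.toNat_natCast]
    congr 1
    rw [h255, Nat.and_two_pow_sub_one_eq_mod, Nat.one_shiftLeft, Nat.and_two_pow, Nat.and_two_pow,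
        Nat.testBit_mod_two_pow]
    simp [hj]
  · have hA : PySem.Int.band b ((1:Int) <<< j) = ↑((1 <<< j) - ((1 <<< j) &&& (-b-1).toNat)) := by
      unfold PySem.Int.band
      rw [h1, if_neg hb, if_pos (Int.natCast_nonneg _), Int.toNat_natCast]
    have hM : PySem.Int.band b 255 = ↑(255 - (255 &&& (-b-1).toNat)) := by
      unfold PySem.Int.band; simp [hb]
    rw [hA, hM, Int.toNat_natCast]
    congr 1
    rw [Nat.and_comm 255, h255, Nat.and_two_pow_sub_one_eq_mod, Nat.one_shiftLeft,
        Nat.and_comm (2^j), Nat.and_two_pow]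
    have ht : (-b-1).toNat.testBit j = ((-b-1).toNat % 256).testBit j := by
      rw [show (256:Nat) = 2^8 from by norm_num, Nat.testBit_mod_two_pow]; simp [hj]
    rw [ht, show (2^8:Nat) = 256 from by norm_num]
    have := pvFin ((-b-1).toNat % 256) (by simp [List.mem_range]; omega) j (by simp [List.mem_range, hj])
    rw [Nat.and_two_pow]
    exact this

theorem pvMaskLt (b : Int) : (PySem.Int.band b 255).toNat < 256 := by
  by_cases hb : 0 ≤ b
  · have hM : PySem.Int.band b 255 = ↑(b.toNat &&& 255) := by
      unfold PySem.Int.band; simp [hb]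
    rw [hM, Int.toNat_natCast]
    have : b.toNat &&& 255 ≤ 255 := Nat.and_le_right
    omega
  · have hM : PySem.Int.band b 255 = ↑(255 - (255 &&& (-b-1).toNat)) := by
      unfold PySem.Int.band; simp [hb]
    rw [hM, Int.toNat_natCast]
    omega

set_option maxRecDepth 8192 in
theorem pvIdx256 : ∀ m ∈ List.range 256,
    ((List.range 8).filter (fun j => decide ((m &&& (1 <<< j) : Nat) ≠ 0))).map (fun j => ((j : Nat) : Int))
      = pvIdxF m m := by decide

theorem pvFoldlFilter {α γ : Type} (l : List α) (p : α → Bool) (f : γ → α → γ) (init : γ) :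
    l.foldl (fun s x => if p x then f s x else s) init = (l.filter p).foldl f init := by
  induction l generalizing init with
  | nil => rfl
  | cons x xs ih =>
    by_cases hx : p x <;> simp [hx, ih]

theorem pvInnerEq (b base : Int) (bits : PySem.Set Int) :
    (List.range 8).foldl (fun s (j : Nat) =>
        if PySem.Int.band b ((1:Int) <<< j) ≠ 0 then PySem.Set.add s ((j:Int) + base) else s) bits
      = pvStrip bits base ((PySem.Int.band b 255).toNat) := by
  have hstep : (List.range 8).foldl (fun s (j : Nat) =>
        if PySem.Int.band b ((1:Int) <<< j) ≠ 0 then PySem.Set.add s ((j:Int) + base) else s) bits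
      = (List.range 8).foldl (fun s (j : Nat) =>
        if (((PySem.Int.band b 255).toNat &&& (1 <<< j) : Nat) ≠ 0) then PySem.Set.add s ((j:Int) + base) else s) bits := by
    apply PySem.List.foldl_congr_mem
    intro acc j hj
    rw [pvBandPow b j (List.mem_range.mp hj)]
    simp [Int.natCast_eq_zero]
  rw [hstep]
  have hfilter := pvFoldlFilter (List.range 8)
      (fun j => decide (((PySem.Int.band b 255).toNat &&& (1 <<< j) : Nat) ≠ 0))
      (fun s (j : Nat) => PySem.Set.add s ((j:Int) + base)) bits
  simp only [decide_eq_true_eq] at hfilter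
  rw [hfilter, ← List.foldl_map (f := fun j : Nat => ((j : Nat) : Int))
        (g := fun s x => PySem.Set.add s (x + base)),
      pvIdx256 ((PySem.Int.band b 255).toNat) (List.mem_range.mpr (pvMaskLt b)),
      pvStrip_eq]

-- ===== VERDICT (by name: the statement is the Claim_ definition above) =====
theorem ExtractBitVector_py_spec : Claim_equal_ExtractBitVector_py := by
  intro data offset _
  unfold Spec_ExtractBitVector_py ExtractBitVector_py ExtractBitVector_py_alt
  congr 1
  funext bits p
  have := pvInnerEq p.2 (p.1 * 8 + offset) bits
  simpa [add_assoc] using this
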